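-- pv_equiv track=rewrite | github.com/slowproj/slowdash | app/server/sd_pubsub.py | topic_match
-- ===== SOURCE A (Python) =====
-- def topic_match(pattern:str, topic:str)->bool:
--     pattern_tokens = pattern.split(".") if pattern else []
--     topic_tokens = topic.split(".") if topic else []
--
--     k_pattern = 0  # index for pattern
--     k_topic = 0  # index for topic
--
--     while k_pattern < len(pattern_tokens):
--         ptoken = pattern_tokens[k_pattern]
--
--         if ptoken == ">":
--             # Matches the rest, including zero tokens
--             return True
--
--         if k_topic >= len(topic_tokens):
--             # Topic ended before pattern did
--             return False
--
--         if ptoken == "*":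
--             k_pattern += 1
--             k_topic += 1
--             continue
--
--         if ptoken != topic_tokens[k_topic]:
--             return False
--
--         k_pattern += 1
--         k_topic += 1
--
--     # Pattern consumed; topic must also be fully consumed
--     return k_topic == len(topic_tokens)
-- ===== SOURCE B (Python) =====
-- def topic_match(pattern: str, topic: str) -> bool:
--     # Character-level scan: walk both strings token by token without splitting them
--     # into lists.  The remainder is a string; None means the token stream is exhausted
--     # (note "a." still has one empty token left after consuming "a").
--     p = pattern if pattern else None
--     t = topic if topic else None
--     while p is not None:
--         i = p.find(".")
--         if i < 0:
--             ptok, p = p, None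
--         else:
--             ptok, p = p[:i], p[i + 1:]
--         if ptok == ">":
--             return True
--         if t is None:
--             return False
--         j = t.find(".")
--         if j < 0:
--             ttok, t = t, None
--         else:
--             ttok, t = t[:j], t[j + 1:]
--         if ptok != "*" and ptok != ttok:
--             return False
--     return t is None
-- ===== Notes on version B (the rewrite author's own statement) =====
-- stated objective: alternative
-- what changed: Replaces A's split('.')-into-lists plus two-index while loop by a character-level scan that peels one dot-delimited token at a time directly off each remainder string (None marking an exhausted stream), never materialising token lists.
import Mathlib
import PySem

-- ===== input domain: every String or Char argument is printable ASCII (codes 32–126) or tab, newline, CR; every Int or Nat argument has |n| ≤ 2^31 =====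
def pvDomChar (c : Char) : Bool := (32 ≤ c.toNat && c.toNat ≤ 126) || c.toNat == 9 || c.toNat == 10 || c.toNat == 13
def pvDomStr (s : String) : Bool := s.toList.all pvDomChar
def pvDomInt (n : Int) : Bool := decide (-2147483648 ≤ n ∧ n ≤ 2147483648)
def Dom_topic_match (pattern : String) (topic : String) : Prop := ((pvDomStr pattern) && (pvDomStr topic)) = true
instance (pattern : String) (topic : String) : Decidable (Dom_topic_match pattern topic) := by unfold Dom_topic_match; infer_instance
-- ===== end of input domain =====

-- B replaces A's split-then-index-walk by a character-level scan that peels one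
-- dot-delimited token at a time directly off each string (no token lists built); objective: alternative.

-- ===== PORT A =====
-- tokenization of A: s.split(".") if s else []  (PySem.Chars.splitOn is exact for a non-empty separator)
def pvTokensA (s : String) : List (List Char) :=
  if s ≠ "" then PySem.Chars.splitOn s.toList ['.'] else []

-- A's while loop over the two token lists (k_pattern / k_topic advance in step)
def topicMatchLoopA : List (List Char) → List (List Char) → Bool
  | ([] : List (List Char)), ts => ts.length == 0        -- "return k_topic == len(topic_tokens)"
  | p :: ps, ts =>
      if p == ['>'] then true
      else match ts with
        | [] => false                -- "topic ended before pattern did"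
        | t :: ts' =>
          if p == ['*'] then topicMatchLoopA ps ts'
          else if p != t then false
          else topicMatchLoopA ps ts'

def topic_match (pattern : String) (topic : String) : Bool :=
  topicMatchLoopA (pvTokensA pattern) (pvTokensA topic)

-- ===== PORT B =====
-- B keeps each string as an un-split remainder; none = token stream exhausted.
-- Python's p.find(".") / p[:i] / p[i+1:] step = takeWhile/dropWhile at the first dot (exact for the 1-char separator).
def pvAdvance : List Char → Option (List Char)
  | [] => none                       -- no dot found: that token was the last one
  | _ :: r => some r                 -- drop the dot, rest of the string remains

def topicMatchGoB : Option (List Char) → Option (List Char) → Bool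
  | none, t => t.isNone              -- "return t is None"
  | some p, t =>
      let ptok := p.takeWhile (· ≠ '.')
      if ptok == ['>'] then true
      else match t with
        | none => false
        | some tl =>
          let ttok := tl.takeWhile (· ≠ '.')
          if ptok == ['*'] || ptok == ttok then
            topicMatchGoB (pvAdvance (p.dropWhile (· ≠ '.'))) (pvAdvance (tl.dropWhile (· ≠ '.')))
          else false
termination_by op _ => match op with | none => 0 | some p => p.length + 1
decreasing_by
  cases hd : p.dropWhile (· ≠ '.') with
  | nil => simp [pvAdvance]
  | cons d r =>
    simp only [pvAdvance]
    have h1 : (p.dropWhile (· ≠ '.')).length ≤ p.length :=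
      (List.dropWhile_sublist _).length_le
    rw [hd] at h1
    simp at h1 ⊢
    omega

def pvOptOf (s : String) : Option (List Char) :=
  if s = "" then none else some s.toList

def topic_match_alt (pattern : String) (topic : String) : Bool :=
  topicMatchGoB (pvOptOf pattern) (pvOptOf topic)

-- ===== PRECONDITION & SPEC =====
def Spec_topic_match (pattern : String) (topic : String) (out : Bool) : Prop := out = topic_match_alt pattern topic
instance (pattern : String) (topic : String) (out : Bool) : Decidable (Spec_topic_match pattern topic out) := by unfold Spec_topic_match; infer_instance

-- ===== CLAIM =====
def Claim_equal_topic_match : Prop := ∀ (pattern : String) (topic : String), Dom_topic_match pattern topic → Spec_topic_match pattern topic (topic_match pattern topic)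

-- ===== LEMMAS AND PROOFS =====
-- structural characterisation of split(".") on a char list
def dotSplit : List Char → List (List Char)
  | [] => [[]]
  | c :: r =>
    if c = '.' then [] :: dotSplit r
    else match dotSplit r with
      | t :: ts => (c :: t) :: ts
      | [] => [[c]]

theorem dotSplit_ne_nil (l : List Char) : dotSplit l ≠ [] := by
  cases l with
  | nil => simp [dotSplit]
  | cons c r =>
    simp only [dotSplit]
    split
    · simp
    · split <;> simp_all

def pvConsHead (p : List Char) : List (List Char) → List (List Char)
  | [] => [p]
  | t :: ts => (p ++ t) :: ts

theorem splitOn_go_dot (fuel : Nat) : ∀ (l : List Char), l.length < fuel → ∀ (cur : List Char) (acc : List (List Char)),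
    PySem.Chars.splitOn.go ['.'] fuel l cur acc = acc.reverse ++ pvConsHead cur.reverse (dotSplit l) := by
  induction fuel with
  | zero => intro l h; omega
  | succ f ih =>
    intro l h cur acc
    cases l with
    | nil =>
      simp [PySem.Chars.splitOn.go, dotSplit, pvConsHead]
    | cons c rest =>
      rw [PySem.Chars.splitOn.go]
      by_cases hc : c = '.'
      · subst hc
        have hp : List.isPrefixOf ['.'] ('.' :: rest) = true := by
          simp [List.isPrefixOf]
        simp only [hp, if_pos]
        have hdrop : List.drop ['.'].length ('.' :: rest) = rest := rfl
        rw [hdrop, ih rest (by simp at h ⊢; omega) [] (List.reverse cur :: acc)]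
        simp only [dotSplit, if_pos]
        cases hd : dotSplit rest with
        | nil => exact absurd hd (dotSplit_ne_nil rest)
        | cons t ts => simp [pvConsHead]
      · have hp : List.isPrefixOf ['.'] (c :: rest) = false := by
          simp [List.isPrefixOf]
          intro h'; exact absurd h'.symm hc
        simp only [hp]
        simp only [Bool.false_eq_true, if_false]
        rw [ih rest (by simp at h ⊢; omega) (c :: cur) acc]
        simp only [dotSplit, if_neg hc]
        cases hd : dotSplit rest with
        | nil => exact absurd hd (dotSplit_ne_nil rest)
        | cons t ts => simp [pvConsHead]

theorem splitOn_dot (l : List Char) : PySem.Chars.splitOn l ['.'] = dotSplit l := by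
  have := splitOn_go_dot (l.length + 1) l (by omega) [] []
  unfold PySem.Chars.splitOn
  rw [this]
  cases hd : dotSplit l with
  | nil => exact absurd hd (dotSplit_ne_nil l)
  | cons t ts => simp [pvConsHead]

theorem dotSplit_eq_take_drop (l : List Char) :
    dotSplit l = l.takeWhile (· ≠ '.') ::
      (match l.dropWhile (· ≠ '.') with
        | [] => ([] : List (List Char))
        | _ :: r => dotSplit r) := by
  induction l with
  | nil => simp [dotSplit]
  | cons c r ih =>
    by_cases hc : c = '.'
    · subst hc; simp [dotSplit, List.takeWhile, List.dropWhile]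
    · simp only [dotSplit, if_neg hc]
      rw [List.takeWhile_cons_of_pos (by simp [hc]), List.dropWhile_cons_of_pos (by simp [hc])]
      rw [ih]

def pvTokensOfOpt : Option (List Char) → List (List Char)
  | none => []
  | some l => dotSplit l

theorem dotSplit_head_tail (l : List Char) :
    dotSplit l = l.takeWhile (· ≠ '.') :: pvTokensOfOpt (pvAdvance (l.dropWhile (· ≠ '.'))) := by
  rw [dotSplit_eq_take_drop]
  cases l.dropWhile (· ≠ '.') <;> simp [pvAdvance, pvTokensOfOpt]

def pvMeasure : Option (List Char) → Nat
  | none => 0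
  | some l => l.length + 1

theorem measure_advance_le (l : List Char) :
    pvMeasure (pvAdvance (l.dropWhile (· ≠ '.'))) ≤ l.length := by
  have h1 : (l.dropWhile (· ≠ '.')).length ≤ l.length :=
    (List.dropWhile_sublist _).length_le
  cases hd : l.dropWhile (· ≠ '.') with
  | nil => simp [pvAdvance, pvMeasure]
  | cons d r =>
    rw [hd] at h1
    simp [pvAdvance, pvMeasure]
    simp at h1
    omega

theorem goB_none (ot : Option (List Char)) :
    topicMatchGoB none ot = topicMatchLoopA (pvTokensOfOpt none) (pvTokensOfOpt ot) := by
  cases ot with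
  | none => simp [topicMatchGoB, pvTokensOfOpt, topicMatchLoopA]
  | some tl =>
    simp only [topicMatchGoB, pvTokensOfOpt, Option.isNone]
    cases hd : dotSplit tl with
    | nil => exact absurd hd (dotSplit_ne_nil tl)
    | cons t ts => simp [topicMatchLoopA]

theorem goB_eq_loopA_aux : ∀ (n : Nat) (op ot : Option (List Char)), pvMeasure op ≤ n →
    topicMatchGoB op ot = topicMatchLoopA (pvTokensOfOpt op) (pvTokensOfOpt ot) := by
  intro n
  induction n with
  | zero =>
    intro op ot h
    cases op with
    | none => exact goB_none ot
    | some p => simp [pvMeasure] at h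
  | succ n ih =>
    intro op ot h
    cases op with
    | none => exact goB_none ot
    | some p =>
      have hlen : p.length ≤ n := by simpa [pvMeasure] using h
      rw [topicMatchGoB.eq_def]
      simp only []
      rw [show pvTokensOfOpt (some p) = dotSplit p from rfl, dotSplit_head_tail p]
      by_cases h1 : p.takeWhile (· ≠ '.') = ['>'] <;>
        simp only [ne_eq, decide_not] at h1
      · simp [h1, topicMatchLoopA]
      · cases ot with
        | none =>
          simp [h1, topicMatchLoopA, pvTokensOfOpt]
        | some tl =>
          rw [show pvTokensOfOpt (some tl) = dotSplit tl from rfl, dotSplit_head_tail tl]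
          have hrec := ih (pvAdvance (p.dropWhile (· ≠ '.'))) (pvAdvance (tl.dropWhile (· ≠ '.')))
            (le_trans (measure_advance_le p) hlen)
          simp only [ne_eq, decide_not] at hrec
          by_cases h2 : p.takeWhile (· ≠ '.') = ['*'] <;>
            simp only [ne_eq, decide_not] at h2
          · simp only [topicMatchLoopA]
            simp [h2, hrec]
          · by_cases h3 : p.takeWhile (· ≠ '.') = tl.takeWhile (· ≠ '.') <;>
              simp only [ne_eq, decide_not] at h3
            · simp only [topicMatchLoopA]
              simp [h3, hrec]
            · simp only [topicMatchLoopA]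
              simp [h1, h2, h3]

theorem goB_eq_loopA (op ot : Option (List Char)) :
    topicMatchGoB op ot = topicMatchLoopA (pvTokensOfOpt op) (pvTokensOfOpt ot) :=
  goB_eq_loopA_aux (pvMeasure op) op ot le_rfl

theorem tokensOfOpt_optOf (s : String) : pvTokensOfOpt (pvOptOf s) = pvTokensA s := by
  unfold pvOptOf pvTokensA
  by_cases hs : s = ""
  · simp [hs, pvTokensOfOpt]
  · simp [hs, pvTokensOfOpt, splitOn_dot]

-- ===== VERDICT =====
theorem topic_match_spec : Claim_equal_topic_match := by
  intro pattern topic _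
  unfold Spec_topic_match topic_match topic_match_alt
  rw [goB_eq_loopA, tokensOfOpt_optOf, tokensOfOpt_optOf]
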